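-- pv_equiv track=rewrite | github.com/786440445/leecode | src/5199.py | change_max_score
-- ===== SOURCE A (Python) =====
-- def get_index(value, list):
--     res = []
--     for i, v in enumerate(list):
--         if v == value:
--             res.append(i)
--     return res
--
-- def get_weight(s):
--     w = []
--     for i in range(len(s)):
--         score = 0
--         for j in range(i, len(s)):
--             if s[i]>s[j]:
--                 score += 1
--         w.append(score)
--     return w
--
-- def change(s, a, b):
--     res = []
--     for i in range(len(s)):
--         if i == a:
--             res.append(s[b])
--         elif i == b:
--             res.append(s[a])
--         else:
--             res.append(s[i])
--     return ''.join(res)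
--
-- def change_max_score(s, pairs):
--     for i in pairs:
--         w = get_weight(s)
--         old_score = sum(w)
--         max_value = max(w)
--         max_index_list = get_index(max_value, w)
--         for max_index in max_index_list:
--             if max_index in i:
--                 s1 = change(s, int(i[0]), int(i[1]))
--                 score = sum(get_weight(s1))
--                 if score < old_score:
--                     s = s1
--     return s
-- ===== SOURCE B (Python) =====
-- def get_weight(s):
--     # one right-to-left pass maintaining a character-count dictionary,
--     # instead of A's quadratic nested index loops
--     w = []
--     seen = {}
--     for c in reversed(s):
--         w.append(sum(n for ch, n in seen.items() if ch < c))
--         seen[c] = seen.get(c, 0) + 1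
--     w.reverse()
--     return w
--
-- def change(s, a, b):
--     res = []
--     for i in range(len(s)):
--         if i == a:
--             res.append(s[b])
--         elif i == b:
--             res.append(s[a])
--         else:
--             res.append(s[i])
--     return ''.join(res)
--
-- def change_max_score(s, pairs):
--     # at most one conditional swap per pair: an accepted swap repeated would
--     # only swap back, which never lowers the score, so A's loop over all
--     # maximal-weight indices has the same net effect as this single test
--     for pair in pairs:
--         w = get_weight(s)
--         old = sum(w)
--         m = max(w)
--         if any(0 <= x < len(w) and w[x] == m for x in pair):
--             s1 = change(s, int(pair[0]), int(pair[1]))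
--             if sum(get_weight(s1)) < old:
--                 s = s1
--     return s
-- ===== Notes on version B (the rewrite author's own statement) =====
-- stated objective: faster
-- what changed: get_weight's quadratic nested index loops are replaced by one right-to-left pass over the string that maintains a character-count dictionary (weight = sum of counts of smaller seen characters), and A's loop over all maximal-weight indices (with its get_index helper) collapses to a single existence test over the pair with at most one conditional swap (a repeated accepted swap would only swap back and never lowers the score).
-- outside the precondition, e.g. on change_max_score('ba', [[1, 5]]): A returns 'ba', B returns 'ba'; on change_max_score('ba', [[1]]): A returns 'ba', B returns 'ba'
import Mathlib
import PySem

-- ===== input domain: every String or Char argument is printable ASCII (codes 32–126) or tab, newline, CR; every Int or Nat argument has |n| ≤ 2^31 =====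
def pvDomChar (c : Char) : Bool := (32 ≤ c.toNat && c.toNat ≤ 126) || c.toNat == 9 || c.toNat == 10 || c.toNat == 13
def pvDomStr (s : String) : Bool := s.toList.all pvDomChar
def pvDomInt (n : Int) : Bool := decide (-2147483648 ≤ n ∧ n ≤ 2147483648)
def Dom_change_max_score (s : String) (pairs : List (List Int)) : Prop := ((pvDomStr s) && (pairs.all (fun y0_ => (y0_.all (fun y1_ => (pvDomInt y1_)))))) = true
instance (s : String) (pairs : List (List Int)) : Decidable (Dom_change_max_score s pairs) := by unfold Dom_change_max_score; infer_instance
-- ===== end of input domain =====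

-- B computes each weight by one right-to-left pass with a character-count dictionary instead of
-- A's nested index loops, and replaces A's loop over all maximal-weight indices by a single
-- existence test over the pair (at most one conditional swap per pair); same return value, faster.

-- ===== PORT A =====

-- list of positions where `list` holds `value`  (enumerate gives Python's int indices)
def get_index (value : Int) (list : List Int) : List Int :=
  (PySem.List.enumerate list 0).foldl
    (fun res iv => if iv.2 = value then res ++ [iv.1] else res) []

-- get_weight on the char list; indices produced by range are always in range, so the
-- pyGetD default ' ' is never read (s[i]/s[j] are exact here).  Python's `>` on the
-- one-char strings s[i], s[j] is code-point comparison = Char's `>`.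
def get_weightL (cs : List Char) : List Int :=
  (PySem.List.pyRange 0 cs.length 1).foldl (fun w i =>
    let score := (PySem.List.pyRange i cs.length 1).foldl (fun score j =>
      if PySem.List.pyGetD cs i ' ' > PySem.List.pyGetD cs j ' ' then score + 1 else score) 0
    w ++ [score]) []

def get_weight (s : String) : List Int := get_weightL s.toList

-- change on the char list; s[a]/s[b] use Python indexing (negative = from the end);
-- the pyGetD default ' ' is read exactly where Python would raise IndexError, which
-- Pre_ excludes.
def changeL (cs : List Char) (a b : Int) : List Char :=
  (PySem.List.pyRange 0 cs.length 1).foldl (fun res i =>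
    if i = a then res ++ [PySem.List.pyGetD cs b ' ']
    else if i = b then res ++ [PySem.List.pyGetD cs a ' ']
    else res ++ [PySem.List.pyGetD cs i ' ']) []

def change (s : String) (a b : Int) : String := String.ofList (changeL s.toList a b)

-- max(w) on an empty w raises ValueError (excluded by Pre_); i[0]/i[1] raise IndexError
-- on a too-short pair (excluded by Pre_): the .getD defaults are never read under Pre_.
-- the body of A's outer `for i in pairs` loop
def change_max_score_step (s : String) (i : List Int) : String :=
  let w := get_weight s
  let old_score := w.sum
  let max_value := (PySem.List.max? w (fun y => y)).getD 0
  let max_index_list := get_index max_value w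
  max_index_list.foldl (fun s max_index =>
    if max_index ∈ i then
      let s1 := change s ((PySem.List.pyGet? i 0).getD 0) ((PySem.List.pyGet? i 1).getD 0)
      let score := (get_weight s1).sum
      if score < old_score then s1 else s
    else s) s

def change_max_score (s : String) (pairs : List (List Int)) : String :=
  pairs.foldl change_max_score_step s

-- ===== PORT B =====

-- B's get_weight: one pass over reversed(s); the state is the weight list under construction
-- together with the dict `seen` of counts of the characters already passed; the appended entry
-- is sum(n for ch, n in seen.items() if ch < c).
def gw_step (st : List Int × PySem.Dict Char Int) (c : Char) : List Int × PySem.Dict Char Int :=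
  (st.1 ++ [((st.2.items.filter (fun p => decide (p.1 < c))).map (fun p => p.2)).sum],
   st.2.insert c (st.2.getD c 0 + 1))

def get_weight_altL (cs : List Char) : List Int :=
  (cs.reverse.foldl gw_step ([], PySem.Dict.empty)).1.reverse

def get_weight_alt (s : String) : List Int := get_weight_altL s.toList

-- Source B's change is the same helper as A's, so its port is shared (def change above).
-- the body of B's `for pair in pairs` loop: `any(0 <= x < len(w) and w[x] == m for x in pair)`
def change_max_score_alt_step (s : String) (pair : List Int) : String :=
  let w := get_weight_alt s
  let old := w.sum
  let m := (PySem.List.max? w (fun y => y)).getD 0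
  if pair.any (fun x => decide (0 ≤ x) && decide (x < (w.length : Int)) && (PySem.List.pyGetD w x 0 == m)) then
    let s1 := change s ((PySem.List.pyGet? pair 0).getD 0) ((PySem.List.pyGet? pair 1).getD 0)
    if (get_weight_alt s1).sum < old then s1 else s
  else s

def change_max_score_alt (s : String) (pairs : List (List Int)) : String :=
  pairs.foldl change_max_score_alt_step s

-- ===== PRECONDITION & SPEC =====

-- Pre_ excludes empty s with a nonempty pairs list (Python's max([]) raises ValueError) and
-- pairs that contain a valid index of s (so they could pass the max-index membership test at
-- some iteration) while lacking two entries or having a first/second entry outside Python's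
-- index range (IndexError when such a pair triggers a swap); a pair with no valid index of s
-- can never trigger and stays inside Pre_.  This still excludes some inputs on which A
-- returns (a malformed pair holding a valid index that never equals a maximal-weight index
-- of the evolving string) — see the claim cites.
def Pre_change_max_score (s : String) (pairs : List (List Int)) : Prop :=
  (pairs ≠ [] → s.toList ≠ []) ∧
  ∀ pair ∈ pairs, (∃ x ∈ pair, 0 ≤ x ∧ x < s.toList.length) →
    (2 ≤ pair.length ∧
     ∀ x ∈ pair.take 2, -(s.toList.length : Int) ≤ x ∧ x < s.toList.length)

instance (s : String) (pairs : List (List Int)) : Decidable (Pre_change_max_score s pairs) := by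
  unfold Pre_change_max_score; infer_instance

def pvWitness_change_max_score : String × List (List Int) := ("dcab", [[0, 3], [1, 2]])

def Spec_change_max_score (s : String) (pairs : List (List Int)) (out : String) : Prop := out = change_max_score_alt s pairs
instance (s : String) (pairs : List (List Int)) (out : String) : Decidable (Spec_change_max_score s pairs out) := by unfold Spec_change_max_score; infer_instance

-- ===== CLAIM (what is proved, stated in full; the proofs are below) =====
def Claim_equal_change_max_score : Prop := ∀ (s : String) (pairs : List (List Int)), Dom_change_max_score s pairs → Pre_change_max_score s pairs → Spec_change_max_score s pairs (change_max_score s pairs)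

-- ===== LEMMAS AND PROOFS =====

def pidx (n : Nat) (x : Int) : Nat := if 0 ≤ x then x.toNat else n - (-x).toNat

theorem pidx_lt (n : Nat) (x : Int) (h1 : -(n:Int) ≤ x) (h2 : x < n) : pidx n x < n := by
  unfold pidx; split_ifs <;> omega

theorem pyGetD_pidx (cs : List Char) (x : Int) (h1 : -(cs.length:Int) ≤ x) (h2 : x < cs.length) :
    PySem.List.pyGetD cs x ' ' = cs.getD (pidx cs.length x) ' ' := by
  by_cases h0 : 0 ≤ x
  · rw [PySem.List.pyGetD_of_nonneg cs ' ' h0]; simp [pidx, h0]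
  · rw [not_le] at h0
    simp only [pidx, if_neg (not_le.mpr h0)]
    simp [PySem.List.pyGetD, PySem.List.pyGet?_neg cs h0 h1, List.getD]

def chFun (cs : List Char) (a b : Int) (k : Nat) : Char :=
  if (k:Int) = a then PySem.List.pyGetD cs b ' '
  else if (k:Int) = b then PySem.List.pyGetD cs a ' '
  else cs.getD k ' '

theorem changeL_eq_map (cs : List Char) (a b : Int) :
    changeL cs a b = (List.range cs.length).map (chFun cs a b) := by
  unfold changeL
  have hf : (fun (res : List Char) (i : Int) =>
      if i = a then res ++ [PySem.List.pyGetD cs b ' ']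
      else if i = b then res ++ [PySem.List.pyGetD cs a ' ']
      else res ++ [PySem.List.pyGetD cs i ' '])
    = (fun res i => res ++ [if i = a then PySem.List.pyGetD cs b ' '
        else if i = b then PySem.List.pyGetD cs a ' ' else PySem.List.pyGetD cs i ' ']) := by
    funext res i; split_ifs <;> rfl
  rw [hf, PySem.List.foldl_append_singleton_eq_map, PySem.List.pyRange_zero_nat, List.map_map]
  simp only [List.nil_append]
  apply List.map_congr_left
  intro k _
  simp [chFun, Function.comp, PySem.List.pyGetD_natCast]

theorem length_changeL (cs : List Char) (a b : Int) : (changeL cs a b).length = cs.length := by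
  rw [changeL_eq_map]; simp

theorem changeL_getD (cs : List Char) (a b : Int) (k : Nat) (hk : k < cs.length) :
    (changeL cs a b).getD k ' ' = chFun cs a b k := by
  rw [changeL_eq_map, PySem.List.getD_map_range _ _ _ _ hk]

theorem list_eq_of_getD (l1 l2 : List Char) (hlen : l1.length = l2.length)
    (h : ∀ k, k < l1.length → l1.getD k ' ' = l2.getD k ' ') : l1 = l2 := by
  apply List.ext_getElem hlen
  intro k h1 h2
  have := h k h1
  rwa [List.getD_eq_getElem?_getD, List.getD_eq_getElem?_getD,
    List.getElem?_eq_getElem h1, List.getElem?_eq_getElem h2] at this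

theorem change_change (cs : List Char) (a b : Int)
    (ha1 : -(cs.length:Int) ≤ a) (ha2 : a < cs.length)
    (hb1 : -(cs.length:Int) ≤ b) (hb2 : b < cs.length) :
    changeL (changeL cs a b) a b = cs ∨ changeL (changeL cs a b) a b = changeL cs a b := by
  set n := cs.length with hn
  have hlen1 : (changeL cs a b).length = n := length_changeL cs a b
  have hlen2 : (changeL (changeL cs a b) a b).length = n := by
    rw [length_changeL, hlen1]
  have hgd1 : ∀ x, -(n:Int) ≤ x → x < n →
      PySem.List.pyGetD (changeL cs a b) x ' ' = chFun cs a b (pidx n x) := by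
    intro x h1 h2
    rw [pyGetD_pidx (changeL cs a b) x (by rw [hlen1]; exact h1) (by rw [hlen1]; exact h2),
      hlen1, changeL_getD cs a b _ (pidx_lt n x h1 h2)]
  have hout : ∀ k, k < n → (changeL (changeL cs a b) a b).getD k ' '
      = if (k:Int) = a then chFun cs a b (pidx n b)
        else if (k:Int) = b then chFun cs a b (pidx n a)
        else chFun cs a b k := by
    intro k hk
    rw [changeL_getD (changeL cs a b) a b k (by rw [hlen1]; exact hk)]
    show (if (k:Int) = a then PySem.List.pyGetD (changeL cs a b) b ' '
          else if (k:Int) = b then PySem.List.pyGetD (changeL cs a b) a ' '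
          else (changeL cs a b).getD k ' ') = _
    rw [hgd1 b hb1 hb2, hgd1 a ha1 ha2, changeL_getD cs a b k hk]
  by_cases h0a : 0 ≤ a
  · by_cases h0b : 0 ≤ b
    · by_cases hab : a = b
      · right
        apply list_eq_of_getD _ _ (by rw [hlen2, hlen1])
        intro k hk
        rw [hlen2] at hk
        rw [hout k hk, changeL_getD cs a b k (by omega)]
        unfold chFun pidx
        subst hab
        split_ifs <;> first | rfl | (congr 1; omega) | omega
      · left
        apply list_eq_of_getD _ _ (by rw [hlen2])
        intro k hk
        rw [hlen2] at hk
        rw [hout k hk]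
        unfold chFun pidx
        simp only [pyGetD_pidx cs a ha1 ha2, pyGetD_pidx cs b hb1 hb2, pidx]
        split_ifs <;> first | rfl | (congr 1; omega) | omega
    · right
      apply list_eq_of_getD _ _ (by rw [hlen2, hlen1])
      intro k hk
      rw [hlen2] at hk
      rw [hout k hk, changeL_getD cs a b k hk]
      unfold chFun pidx
      simp only [pyGetD_pidx cs a ha1 ha2, pyGetD_pidx cs b hb1 hb2, pidx]
      split_ifs <;> first | rfl | (congr 1; omega) | omega
  · by_cases h0b : 0 ≤ b
    · right
      apply list_eq_of_getD _ _ (by rw [hlen2, hlen1])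
      intro k hk
      rw [hlen2] at hk
      rw [hout k hk, changeL_getD cs a b k hk]
      unfold chFun pidx
      simp only [pyGetD_pidx cs a ha1 ha2, pyGetD_pidx cs b hb1 hb2, pidx]
      split_ifs <;> first | rfl | (congr 1; omega) | omega
    · right
      apply list_eq_of_getD _ _ (by rw [hlen2, hlen1])
      intro k hk
      rw [hlen2] at hk
      rw [hout k hk, changeL_getD cs a b k hk]
      unfold chFun pidx
      simp only [pyGetD_pidx cs a ha1 ha2, pyGetD_pidx cs b hb1 hb2, pidx]
      split_ifs <;> first | rfl | (congr 1; omega) | omega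

-- the weight both get_weight versions compute: w[i] counts the later characters below s[i]
def Wspec (cs : List Char) : List Int :=
  (List.range cs.length).map
    (fun i => (((cs.drop (i+1)).countP (fun d => decide (d < cs.getD i ' '))) : Int))

theorem gwA_char (cs : List Char) : get_weightL cs = Wspec cs := by
  unfold get_weightL Wspec
  rw [PySem.List.foldl_append_singleton_eq_map, PySem.List.pyRange_zero_nat, List.map_map]
  simp only [List.nil_append]
  apply List.map_congr_left
  intro k hk
  rw [List.mem_range] at hk
  simp only [Function.comp]
  rw [PySem.List.foldl_ite_add_one, zero_add]
  have hcomp : (fun x => decide (PySem.List.pyGetD cs (k:Int) ' ' > PySem.List.pyGetD cs x ' '))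
      = ((fun d => decide (PySem.List.pyGetD cs (k:Int) ' ' > d)) ∘
         (fun j => PySem.List.pyGetD cs j ' ')) := rfl
  rw [hcomp, ← List.countP_map,
    PySem.List.map_pyGetD_pyRange' cs ' ' (show (0:Int) ≤ (k:Int) by omega), Int.toNat_natCast]
  have hdrop : cs.drop k = cs[k] :: cs.drop (k+1) := List.drop_eq_getElem_cons hk
  rw [hdrop, List.countP_cons]
  simp only [PySem.List.pyGetD_natCast, List.getD_eq_getElem cs ' ' hk, gt_iff_lt]
  simp

-- the dict built by the pass over the processed characters is Counter(processed)
theorem cdict_append (pre : List Char) (c : Char) :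
    (pre ++ [c]).foldl (fun d x => d.insert x (d.getD x 0 + 1)) (PySem.Dict.empty : PySem.Dict Char Int)
      = (pre.foldl (fun d x => d.insert x (d.getD x 0 + 1)) (PySem.Dict.empty : PySem.Dict Char Int)).insert c
          ((pre.foldl (fun d x => d.insert x (d.getD x 0 + 1)) (PySem.Dict.empty : PySem.Dict Char Int)).getD c 0 + 1) := by
  rw [List.foldl_append]; rfl

theorem itemsum_eq (pre : List Char) (c : Char) :
    ((((pre.foldl (fun d x => d.insert x (d.getD x 0 + 1)) PySem.Dict.empty).items.filter
        (fun p => decide (p.1 < c))).map (fun p => p.2)).sum)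
      = ((pre.countP (fun d => decide (d < c))) : Int) := by
  rw [PySem.Dict.foldl_insert_getD_add_one_eq_counter, PySem.Dict.items_counter]
  rw [List.filter_map, List.map_map]
  have hq : ((fun p : Char × Int => decide (p.1 < c)) ∘ (fun k => (k, (pre.count k : Int))))
      = (fun k => decide (k < c)) := rfl
  rw [hq]
  have hperm : ((PySem.Set.ofList pre).filter (fun k => decide (k < c))).Perm
      (pre.dedup.filter (fun k => decide (k < c))) := by
    refine List.Perm.filter _ ?_
    refine (List.perm_ext_iff_of_nodup (PySem.Set.nodup_ofList pre) pre.nodup_dedup).mpr ?_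
    intro x
    rw [PySem.Set.mem_ofList, List.mem_dedup]
  calc (((PySem.Set.ofList pre).filter (fun k => decide (k < c))).map
          ((fun p : Char × Int => p.2) ∘ (fun k => (k, (pre.count k : Int))))).sum
      = (((PySem.Set.ofList pre).filter (fun k => decide (k < c))).map
          (fun k => ((pre.count k : Nat) : Int))).sum := rfl
    _ = ((pre.dedup.filter (fun k => decide (k < c))).map
          (fun k => ((pre.count k : Nat) : Int))).sum :=
        (hperm.map (fun k => ((pre.count k : Nat) : Int))).sum_eq
    _ = (((pre.dedup.filter (fun k => decide (k < c))).map
          (fun k => (pre.count k : Nat))).map (Nat.cast : Nat → Int)).sum := by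
        rw [List.map_map]; rfl
    _ = ((((pre.dedup.filter (fun k => decide (k < c))).map
          (fun k => (pre.count k : Nat))).sum : Nat) : Int) := (Nat.cast_list_sum _).symm
    _ = ((pre.countP (fun d => decide (d < c))) : Int) := by
        rw [List.sum_map_count_dedup_filter_eq_countP]

theorem core_spec (L : List Char) : ∀ (pre : List Char) (acc : List Int),
    (L.foldl gw_step (acc, pre.foldl (fun d x => d.insert x (d.getD x 0 + 1)) PySem.Dict.empty)).1
      = acc ++ (List.range L.length).map
          (fun k => (((pre ++ L.take k).countP (fun d => decide (d < L.getD k ' '))) : Int)) := by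
  induction L with
  | nil => intro pre acc; simp
  | cons c t ih =>
    intro pre acc
    rw [List.foldl_cons]
    have hstep : gw_step (acc, pre.foldl (fun d x => d.insert x (d.getD x 0 + 1)) PySem.Dict.empty) c
        = (acc ++ [((pre.countP (fun d => decide (d < c))) : Int)],
           (pre ++ [c]).foldl (fun d x => d.insert x (d.getD x 0 + 1)) PySem.Dict.empty) := by
      unfold gw_step
      dsimp only
      rw [itemsum_eq, cdict_append]
    rw [hstep, ih (pre ++ [c])]
    rw [List.append_assoc, List.singleton_append]
    congr 1
    rw [List.length_cons, List.range_succ_eq_map, List.map_cons, List.map_map]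
    congr 1
    · simp
    · apply List.map_congr_left
      intro k _
      simp [Function.comp, List.append_assoc]

theorem gwB_char (cs : List Char) :
    get_weight_altL cs
      = ((List.range cs.length).map (fun k =>
          (((cs.reverse.take k).countP (fun d => decide (d < cs.reverse.getD k ' '))) : Int))).reverse := by
  unfold get_weight_altL
  have h := core_spec cs.reverse [] []
  simp only [List.nil_append] at h
  rw [show (PySem.Dict.empty : PySem.Dict Char Int)
        = ([] : List Char).foldl (fun d x => d.insert x (d.getD x 0 + 1)) PySem.Dict.empty from rfl,
    h, List.length_reverse]

theorem gw_eq (s : String) : get_weight s = get_weight_alt s := by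
  unfold get_weight get_weight_alt
  rw [gwA_char, gwB_char]
  apply List.ext_getElem
  · simp [Wspec]
  · intro i h1 h2
    have hi : i < s.toList.length := by simpa [Wspec] using h1
    rw [List.getElem_reverse]
    simp only [List.length_map, List.length_range]
    simp only [Wspec, List.getElem_map, List.getElem_range]
    have hidx : s.toList.length - 1 - (s.toList.length - 1 - i) = i := by omega
    have e1 : s.toList.reverse.getD (s.toList.length - 1 - i) ' ' = s.toList.getD i ' ' := by
      rw [List.getD_eq_getElem _ ' ' (by simpa using (by omega : s.toList.length - 1 - i < s.toList.length)),
        List.getD_eq_getElem _ ' ' hi, List.getElem_reverse]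
      simp only [hidx]
    have e2 : s.toList.reverse.take (s.toList.length - 1 - i) = (s.toList.drop (i+1)).reverse := by
      have hdr : s.toList.length - (s.toList.length - 1 - i) = i + 1 := by omega
      rw [List.take_reverse, hdr]
    rw [e1, e2, List.countP_reverse]

theorem gw_length (s : String) : (get_weight s).length = s.toList.length := by
  unfold get_weight
  rw [gwA_char]; simp [Wspec]

theorem foldl_fix {α β : Type} (g : α → β → α) (T : α) (L : List β)
    (h : ∀ q ∈ L, g T q = T) : L.foldl g T = T := by
  induction L with
  | nil => rfl
  | cons x t ih =>
    rw [List.foldl_cons, h x (by simp)]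
    exact ih (fun q hq => h q (by simp [hq]))

theorem inner_fold (L pair : List Int) (s : String) (step : String → String)
    (hfix : step (step s) = step s) :
    L.foldl (fun acc p => if p ∈ pair then step acc else acc) s
      = if ∃ p ∈ L, p ∈ pair then step s else s := by
  induction L with
  | nil => simp
  | cons x t ih =>
    rw [List.foldl_cons]
    by_cases hx : x ∈ pair
    · rw [if_pos hx, if_pos ⟨x, by simp, hx⟩]
      apply foldl_fix
      intro q _
      by_cases hq : q ∈ pair
      · rw [if_pos hq, hfix]
      · rw [if_neg hq]
    · rw [if_neg hx, ih]
      by_cases he : ∃ p ∈ t, p ∈ pair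
      · rw [if_pos he, if_pos (by obtain ⟨p, hp, hp2⟩ := he; exact ⟨p, by simp [hp], hp2⟩)]
      · rw [if_neg he, if_neg (by rintro ⟨p, hp, hp2⟩; simp at hp; rcases hp with rfl | hp; exact hx hp2; exact he ⟨p, hp, hp2⟩)]

theorem toList_change (s : String) (a b : Int) : (change s a b).toList = changeL s.toList a b := by
  simp [change]

theorem step_fix (s : String) (a b : Int) (old : Int) (hold : (get_weight s).sum = old)
    (ha1 : -(s.toList.length:Int) ≤ a) (ha2 : a < s.toList.length)
    (hb1 : -(s.toList.length:Int) ≤ b) (hb2 : b < s.toList.length) :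
    (fun acc => if (get_weight (change acc a b)).sum < old then change acc a b else acc)
      ((fun acc => if (get_weight (change acc a b)).sum < old then change acc a b else acc) s)
    = (fun acc => if (get_weight (change acc a b)).sum < old then change acc a b else acc) s := by
  simp only []
  by_cases hc : (get_weight (change s a b)).sum < old
  · rw [if_pos hc]
    have h2 : (change (change s a b) a b).toList = changeL (changeL s.toList a b) a b := by
      rw [toList_change, toList_change]
    rcases change_change s.toList a b ha1 ha2 hb1 hb2 with h | h
    · -- swap back: score is old again, rejected
      have : get_weight (change (change s a b) a b) = get_weight s := by
        unfold get_weight; rw [h2, h]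
      rw [if_neg (by rw [this, hold]; omega)]
    · -- second change is a no-op
      have hstr : change (change s a b) a b = change s a b := by
        show String.ofList (changeL (change s a b).toList a b) = change s a b
        rw [toList_change, h, ← toList_change, String.ofList_toList]
      rw [if_pos (by rw [hstr]; exact hc), hstr]
  · rw [if_neg hc, if_neg hc]

theorem get_index_eq (value : Int) (w : List Int) :
    get_index value w
      = ((PySem.List.enumerate w 0).filter (fun iv => iv.2 == value)).map (fun iv => iv.1) := by
  unfold get_index
  have h : (fun (res : List Int) (iv : Int × Int) => if iv.2 = value then res ++ [iv.1] else res)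
       = (fun res iv => if (fun iv : Int × Int => iv.2 == value) iv = true
            then res ++ [(fun iv : Int × Int => iv.1) iv] else res) := by
    funext res iv; simp [beq_iff_eq]
  rw [h, PySem.List.foldl_append_if]
  simp

theorem trigger_iff (m : Int) (w pair : List Int) :
    (∃ p ∈ get_index m w, p ∈ pair)
      ↔ (pair.any (fun x => decide (0 ≤ x) && decide (x < (w.length : Int)) && (PySem.List.pyGetD w x 0 == m))) = true := by
  rw [get_index_eq]
  simp only [List.any_eq_true, List.mem_map, List.mem_filter, Bool.and_eq_true, beq_iff_eq,
    decide_eq_true_eq]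
  constructor
  · rintro ⟨p, ⟨iv, ⟨hiv, hm⟩, rfl⟩, hp⟩
    rw [PySem.List.mem_enumerate_iff] at hiv
    obtain ⟨k, hk, rfl⟩ := hiv
    refine ⟨(0:Int) + k, hp, ⟨⟨by omega, by push_cast; omega⟩, ?_⟩⟩
    have : ((0:Int) + k) = (k : Int) := by omega
    rw [this, PySem.List.pyGetD_natCast, List.getD_eq_getElem _ _ hk]
    exact hm
  · rintro ⟨x, hx, ⟨⟨hx0, hxlen⟩, hm⟩⟩
    have hklt : x.toNat < w.length := by omega
    refine ⟨x, ⟨(x, w[x.toNat]), ⟨?_, ?_⟩, rfl⟩, hx⟩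
    · rw [PySem.List.mem_enumerate_iff]
      exact ⟨x.toNat, hklt, by rw [show (0:Int) + (x.toNat : Int) = x from by omega]⟩
    · show w[x.toNat] = m
      rw [PySem.List.pyGetD_eq_getElem w 0 hx0 (by exact_mod_cast hxlen)] at hm
      exact hm

theorem mem_get_index (m p : Int) (w : List Int) (hp : p ∈ get_index m w) :
    0 ≤ p ∧ p < w.length := by
  rw [get_index_eq] at hp
  simp only [List.mem_map, List.mem_filter] at hp
  obtain ⟨iv, ⟨hiv, _⟩, rfl⟩ := hp
  rw [PySem.List.mem_enumerate_iff] at hiv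
  obtain ⟨k, hk, rfl⟩ := hiv
  simp; omega

theorem step_eq_skip (s : String) (pair : List Int)
    (hex : ¬ ∃ x ∈ pair, 0 ≤ x ∧ x < s.toList.length) :
    change_max_score_step s pair = s ∧ change_max_score_alt_step s pair = s := by
  constructor
  · simp only [change_max_score_step]
    apply foldl_fix
    intro q hq
    obtain ⟨hq0, hq1⟩ := mem_get_index _ q _ hq
    rw [if_neg (fun hmem => hex ⟨q, hmem, hq0, by rw [← gw_length s]; exact hq1⟩)]
  · simp only [change_max_score_alt_step, ← gw_eq]
    have hany : (pair.any (fun x => decide (0 ≤ x) && decide (x < ((get_weight s).length : Int))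
        && (PySem.List.pyGetD (get_weight s) x 0 == (PySem.List.max? (get_weight s) (fun y => y)).getD 0))) = false := by
      rw [List.any_eq_false]
      intro x hxmem
      simp only [Bool.and_eq_true, decide_eq_true_eq, not_and]
      intro hx0 _
      exact hex ⟨x, hxmem, hx0.1, by have h := hx0.2; rwa [gw_length s] at h⟩
    rw [hany]
    simp

theorem step_eq (s : String) (pair : List Int)
    (himp : (∃ x ∈ pair, 0 ≤ x ∧ x < s.toList.length) →
      (2 ≤ pair.length ∧
       ∀ x ∈ pair.take 2, -(s.toList.length : Int) ≤ x ∧ x < s.toList.length)) :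
    change_max_score_step s pair = change_max_score_alt_step s pair := by
  by_cases hex : ∃ x ∈ pair, 0 ≤ x ∧ x < s.toList.length
  swap
  · obtain ⟨hA, hB⟩ := step_eq_skip s pair hex
    rw [hA, hB]
  obtain ⟨h2, hbnd⟩ := himp hex
  obtain ⟨x0, x1, r, rfl⟩ : ∃ x0 x1 r, pair = x0 :: x1 :: r := by
    match pair, h2 with
    | x0 :: x1 :: r, _ => exact ⟨x0, x1, r, rfl⟩
  have hx0 := hbnd x0 (by simp)
  have hx1 := hbnd x1 (by simp)
  have hg0 : (PySem.List.pyGet? (x0 :: x1 :: r) 0).getD 0 = x0 := by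
    rw [PySem.List.pyGet?_zero_cons]; rfl
  have hg1 : (PySem.List.pyGet? (x0 :: x1 :: r) 1).getD 0 = x1 := by
    have h := PySem.List.pyGet?_ofNat (x0 :: x1 :: r) 1 (by simp)
    simp only [Nat.cast_one] at h
    rw [h]; rfl
  simp only [change_max_score_step, change_max_score_alt_step, ← gw_eq, hg0, hg1]
  rw [inner_fold (get_index ((PySem.List.max? (get_weight s) (fun y => y)).getD 0) (get_weight s))
      (x0 :: x1 :: r) s
      (fun acc => if (get_weight (change acc x0 x1)).sum < (get_weight s).sum
        then change acc x0 x1 else acc)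
      (step_fix s x0 x1 (get_weight s).sum rfl hx0.1 hx0.2 hx1.1 hx1.2)]
  simp only [trigger_iff]

theorem stepB_length (s : String) (pair : List Int) :
    (change_max_score_alt_step s pair).toList.length = s.toList.length := by
  simp only [change_max_score_alt_step]
  split_ifs <;> simp [change, String.toList_ofList, length_changeL]

theorem main_aux (pairs : List (List Int)) : ∀ (s : String),
    (∀ pair ∈ pairs, (∃ x ∈ pair, 0 ≤ x ∧ x < s.toList.length) →
      (2 ≤ pair.length ∧
       ∀ x ∈ pair.take 2, -(s.toList.length : Int) ≤ x ∧ x < s.toList.length)) →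
    change_max_score s pairs = change_max_score_alt s pairs := by
  induction pairs with
  | nil => intro s _; rfl
  | cons pair rest ih =>
    intro s hpre
    show List.foldl change_max_score_step (change_max_score_step s pair) rest
       = List.foldl change_max_score_alt_step (change_max_score_alt_step s pair) rest
    rw [step_eq s pair (hpre pair (by simp))]
    have hlen := stepB_length s pair
    exact ih (change_max_score_alt_step s pair) (by
      intro p hp
      rw [hlen]
      exact hpre p (by simp [hp]))

-- ===== VERDICT (by name: the statement is the Claim_ definition above) =====
theorem change_max_score_spec : Claim_equal_change_max_score := by
  intro s pairs _hdom hpre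
  unfold Spec_change_max_score
  unfold Pre_change_max_score at hpre
  exact main_aux pairs s hpre.2
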